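-- pv_equiv track=rewrite | github.com/2SOOY/INU_Study | SOOYEON/완전탐색04_카펫.py | get_width_height
-- ===== SOURCE A (Python) =====
-- def get_width_height(area):
--     """
--     사각형 면적이 주어질 때, 가능한 가로 세로 길이의 조합을 반환하는 함수
--     INPUT :직사각형 면적 (NUMBER)
--     OUTPUT : [(가로, 세로), ...] (LIST)
--     """
--     possible_list = []
--
--     # 면적이 1인 경우
--     if area == 1:
--         return [(1, 1)]
--
--     # 그 외 경우
--     for height in range(1, int(area // 2) + 1):
--         if area % height == 0:
--             width = area // height
--             possible_list.append((width, height))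
--
--     return possible_list
-- ===== SOURCE B (Python) =====
-- def get_width_height(area):
--     """Divisor pairs via sqrt enumeration: O(sqrt(area)) instead of A's O(area)."""
--     if area == 1:
--         return [(1, 1)]
--     small = []
--     large = []
--     i = 1
--     while i * i <= area:
--         if area % i == 0:
--             j = area // i
--             if j != i and j != area:
--                 small.append(i)
--                 large.append(j)
--             else:
--                 small.append(i)
--         i += 1
--     heights = small + large[::-1]
--     return [(area // h, h) for h in heights]
-- ===== Notes on version B (the rewrite author's own statement) =====
-- stated objective: faster
-- what changed: B enumerates divisors only up to sqrt(area) in one while loop, collecting each small divisor and its large complement, then concatenates small divisors with the reversed complements instead of testing every height from 1 to area//2.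
import Mathlib
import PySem

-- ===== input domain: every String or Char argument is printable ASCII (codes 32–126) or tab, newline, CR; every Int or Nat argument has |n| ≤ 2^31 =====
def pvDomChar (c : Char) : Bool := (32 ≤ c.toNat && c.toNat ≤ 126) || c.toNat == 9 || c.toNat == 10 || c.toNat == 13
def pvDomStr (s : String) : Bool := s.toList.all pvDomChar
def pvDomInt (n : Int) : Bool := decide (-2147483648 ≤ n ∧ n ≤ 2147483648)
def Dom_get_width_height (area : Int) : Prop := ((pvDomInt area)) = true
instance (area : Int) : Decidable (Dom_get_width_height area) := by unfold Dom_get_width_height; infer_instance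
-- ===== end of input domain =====

-- B replaces A's scan of every height up to area//2 by a sqrt-bounded divisor enumeration (asymptotically faster, measured).

-- ===== PORT A =====
def get_width_height (area : Int) : List (Int × Int) :=
  if area == 1 then [(1, 1)]
  else
    (PySem.List.pyRange 1 (PySem.Int.floordiv area 2 + 1) 1).foldl
      (fun acc height =>
        if PySem.Int.mod area height == 0 then
          acc ++ [(PySem.Int.floordiv area height, height)]
        else acc) []

-- ===== PORT B =====
-- termination helper for the while loop: i strictly increases while i*i ≤ area
theorem pvLoopB_measure (area i : Int) (h : i * i ≤ area) :
    (area + 1 - (i + 1)).toNat < (area + 1 - i).toNat := by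
  have h2 : 2 * area ≥ 2 * i - 1 := by nlinarith [sq_nonneg (i - 1)]
  omega

-- the while loop of Source B: collects small divisors and their large complements
def pvLoopB (area i : Int) (small large : List Int) : List Int × List Int :=
  if h : i * i ≤ area then
    if PySem.Int.mod area i == 0 then
      let j := PySem.Int.floordiv area i
      if j != i && j != area then
        pvLoopB area (i + 1) (small ++ [i]) (large ++ [j])
      else
        pvLoopB area (i + 1) (small ++ [i]) large
    else
      pvLoopB area (i + 1) small large
  else (small, large)
termination_by (area + 1 - i).toNat
decreasing_by all_goals exact pvLoopB_measure area i h

def get_width_height_alt (area : Int) : List (Int × Int) :=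
  if area == 1 then [(1, 1)]
  else
    let p := pvLoopB area 1 [] []
    let heights := p.1 ++ p.2.reverse
    heights.map (fun h => (PySem.Int.floordiv area h, h))

-- ===== PRECONDITION & SPEC =====
def Spec_get_width_height (area : Int) (out : List (Int × Int)) : Prop := out = get_width_height_alt area
instance (area : Int) (out : List (Int × Int)) : Decidable (Spec_get_width_height area out) := by unfold Spec_get_width_height; infer_instance

-- ===== CLAIM (what is proved, stated in full; the proofs are below) =====
def Claim_equal_get_width_height : Prop := ∀ (area : Int), Dom_get_width_height area → Spec_get_width_height area (get_width_height area)

-- ===== LEMMAS AND PROOFS =====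

-- the small-divisor list the loop accumulates, as a filtered range
def pvS (area i : Int) : List Int :=
  (PySem.List.pyRange i (Int.sqrt area + 1) 1).filter (fun x => PySem.Int.mod area x == 0)

-- the large-complement list the loop accumulates
def pvL (area i : Int) : List Int :=
  ((PySem.List.pyRange i (Int.sqrt area + 1) 1).filter
      (fun x => PySem.Int.mod area x == 0 && PySem.Int.floordiv area x != x && PySem.Int.floordiv area x != area)).map
    (fun x => PySem.Int.floordiv area x)

theorem pv_sq_le_iff (area x : Int) (h0 : 0 ≤ area) (hx : 1 ≤ x) :
    x * x ≤ area ↔ x ≤ Int.sqrt area := by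
  have hx0 : (x.toNat : Int) = x := Int.toNat_of_nonneg (by omega)
  have ha0 : (area.toNat : Int) = area := Int.toNat_of_nonneg h0
  rw [Int.sqrt, ← hx0, ← ha0, ← Nat.cast_mul, Nat.cast_le, Nat.cast_le]
  exact Nat.le_sqrt.symm

theorem pvLoopB_spec (area : Int) (h0 : 0 ≤ area) :
    ∀ n i s l, (Int.sqrt area + 1 - i).toNat = n → 1 ≤ i →
      pvLoopB area i s l = (s ++ pvS area i, l ++ pvL area i) := by
  intro n
  induction n using Nat.strong_induction_on with
  | _ n IH =>
    intro i s l hn hi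
    by_cases hsq : i * i ≤ area
    · have him : i ≤ Int.sqrt area := (pv_sq_le_iff area i h0 hi).1 hsq
      have hcons : PySem.List.pyRange i (Int.sqrt area + 1) 1 =
          i :: PySem.List.pyRange (i + 1) (Int.sqrt area + 1) 1 :=
        PySem.List.pyRange_one_cons (by omega)
      have hrec : ∀ s' l', pvLoopB area (i + 1) s' l' =
          (s' ++ pvS area (i + 1), l' ++ pvL area (i + 1)) := fun s' l' =>
        IH ((Int.sqrt area + 1 - (i + 1)).toNat) (by omega) (i + 1) s' l' rfl (by omega)
      rw [pvLoopB, dif_pos hsq]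
      by_cases hm : PySem.Int.mod area i = 0
      · rw [if_pos (by simp [hm])]
        by_cases hj : (PySem.Int.floordiv area i != i && PySem.Int.floordiv area i != area) = true
        · rw [if_pos hj, hrec]
          unfold pvS pvL
          rw [hcons, List.filter_cons_of_pos (by simp [hm]),
              List.filter_cons_of_pos (by simp [hm, hj])]
          simp [List.append_assoc]
        · rw [if_neg hj, hrec]
          unfold pvS pvL
          rw [hcons, List.filter_cons_of_pos (by simp [hm]),
              List.filter_cons_of_neg (by simp [hm]; simp at hj; exact hj)]
          simp [List.append_assoc]
      · rw [if_neg (by simp [hm]), hrec]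
        unfold pvS pvL
        rw [hcons, List.filter_cons_of_neg (by simp [hm]),
            List.filter_cons_of_neg (by simp [hm])]
    · have him : Int.sqrt area < i := by
        by_contra hc
        exact hsq ((pv_sq_le_iff area i h0 hi).2 (by omega))
      have hnil : PySem.List.pyRange i (Int.sqrt area + 1) 1 = [] :=
        PySem.List.pyRange_one_eq_nil (by omega)
      rw [pvLoopB, dif_neg hsq]
      unfold pvS pvL
      simp [hnil]

-- strict antitonicity of exact division among divisors
theorem pv_div_lt (area x y : Int) (h2 : 2 ≤ area) (hx : 1 ≤ x) (hxy : x < y)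
    (hdx : x ∣ area) (hdy : y ∣ area) : area / y < area / x := by
  have hax : area / x * x = area := Int.ediv_mul_cancel hdx
  have hay : area / y * y = area := Int.ediv_mul_cancel hdy
  have hA : 1 ≤ area / x := by nlinarith
  by_contra hc
  push Not at hc
  nlinarith

-- membership in the small-divisor list
theorem pv_memS (area : Int) (_h2 : 2 ≤ area) (x : Int) :
    x ∈ pvS area 1 ↔ 1 ≤ x ∧ x ≤ Int.sqrt area ∧ x ∣ area := by
  unfold pvS
  simp only [List.mem_filter, PySem.List.mem_pyRange_one, beq_iff_eq,
    PySem.Int.mod_eq_zero_iff_dvd]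
  constructor
  · rintro ⟨⟨ha, hb⟩, hc⟩; exact ⟨ha, by omega, hc⟩
  · rintro ⟨ha, hb, hc⟩; exact ⟨⟨ha, by omega⟩, hc⟩

-- membership in the large-complement list
theorem pv_memL (area : Int) (h2 : 2 ≤ area) (v : Int) :
    v ∈ pvL area 1 ↔ Int.sqrt area < v ∧ v * 2 ≤ area ∧ v ∣ area := by
  have h0 : (0:Int) ≤ area := by omega
  unfold pvL
  simp only [List.mem_map, List.mem_filter, PySem.List.mem_pyRange_one, Bool.and_eq_true,
    beq_iff_eq, bne_iff_ne, PySem.Int.mod_eq_zero_iff_dvd]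
  constructor
  · rintro ⟨i, ⟨⟨hi1, hi2⟩, ⟨hdvd, hne1⟩, hne2⟩, rfl⟩
    have hfd : PySem.Int.floordiv area i = area / i :=
      PySem.Int.floordiv_eq_ediv_of_pos (by omega)
    have hmul : area / i * i = area := Int.ediv_mul_cancel hdvd
    have hsq : i * i ≤ area := (pv_sq_le_iff area i h0 hi1).2 (by omega)
    have hlt : i < area / i := by
      rcases lt_or_eq_of_le (show i ≤ area / i by nlinarith) with h | h
      · exact h
      · exact absurd (hfd.trans h.symm) hne1
    have hi2' : 2 ≤ i := by
      rcases (by omega : i = 1 ∨ 2 ≤ i) with rfl | h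
      · exact absurd (by rw [hfd, Int.ediv_one]) hne2
      · exact h
    refine ⟨?_, ?_, ?_⟩
    · rw [hfd]
      by_contra hc
      push Not at hc
      have : area / i * (area / i) ≤ area := (pv_sq_le_iff area (area / i) h0 (by omega)).2 hc
      nlinarith
    · rw [hfd]; nlinarith
    · rw [hfd]; exact ⟨i, hmul.symm⟩
  · rintro ⟨hv1, hv2, hdvd⟩
    have hm1 : 1 ≤ Int.sqrt area := (pv_sq_le_iff area 1 h0 le_rfl).1 (by omega)
    have hv0 : 1 ≤ v := by omega
    have hmul : area / v * v = area := Int.ediv_mul_cancel hdvd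
    have hvv : ¬ v * v ≤ area := fun hc => by
      have := (pv_sq_le_iff area v h0 hv0).1 hc; omega
    set i := area / v with hidef
    have hi2 : 2 ≤ i := by nlinarith
    have hisq : i * i ≤ area := by nlinarith
    have him : i ≤ Int.sqrt area := (pv_sq_le_iff area i h0 (by omega)).1 hisq
    have hfd : PySem.Int.floordiv area i = area / i :=
      PySem.Int.floordiv_eq_ediv_of_pos (by omega)
    have hdiv : area / i = v := by
      rw [show area = i * v by nlinarith]
      exact Int.mul_ediv_cancel_left v (by omega)
    refine ⟨i, ⟨⟨by omega, by omega⟩, ⟨⟨v, by nlinarith⟩, ?_⟩, ?_⟩, by rw [hfd, hdiv]⟩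
    · rw [hfd, hdiv]; nlinarith
    · rw [hfd, hdiv]; omega

-- the heights list equality: sqrt enumeration gives exactly the heights A scans
theorem pv_heights_eq (area : Int) (h2 : 2 ≤ area) :
    pvS area 1 ++ (pvL area 1).reverse =
      (PySem.List.pyRange 1 (PySem.Int.floordiv area 2 + 1) 1).filter
        (fun h => PySem.Int.mod area h == 0) := by
  have h0 : (0:Int) ≤ area := by omega
  have hd2 : ∀ x : Int, x ≤ PySem.Int.floordiv area 2 ↔ x * 2 ≤ area := fun x =>
    PySem.Int.le_floordiv_iff_mul_le (by omega)
  -- pairwise (<) on the left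
  have pwS : (pvS area 1).Pairwise (· < ·) :=
    (PySem.List.pairwise_lt_pyRange_one 1 (Int.sqrt area + 1)).filter _
  have pwL : (pvL area 1).Pairwise (fun a b => b < a) := by
    unfold pvL
    rw [List.pairwise_map]
    refine List.Pairwise.imp_of_mem ?_
      ((PySem.List.pairwise_lt_pyRange_one 1 (Int.sqrt area + 1)).filter _)
    intro a b ha hb hab
    simp only [List.mem_filter, PySem.List.mem_pyRange_one, Bool.and_eq_true, beq_iff_eq,
      bne_iff_ne, PySem.Int.mod_eq_zero_iff_dvd] at ha hb
    rw [PySem.Int.floordiv_eq_ediv_of_pos (by omega : (0:Int) < a),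
        PySem.Int.floordiv_eq_ediv_of_pos (by omega : (0:Int) < b)]
    exact pv_div_lt area a b h2 (by omega) hab ha.2.1.1 hb.2.1.1
  have pwLrev : ((pvL area 1).reverse).Pairwise (· < ·) := by
    rw [List.pairwise_reverse]; exact pwL
  have pwLeft : (pvS area 1 ++ (pvL area 1).reverse).Pairwise (· < ·) := by
    rw [List.pairwise_append]
    refine ⟨pwS, pwLrev, ?_⟩
    intro a ha b hb
    rw [List.mem_reverse] at hb
    have ha' := (pv_memS area h2 a).1 ha
    have hb' := (pv_memL area h2 b).1 hb
    omega
  have pwRight : ((PySem.List.pyRange 1 (PySem.Int.floordiv area 2 + 1) 1).filter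
      (fun h => PySem.Int.mod area h == 0)).Pairwise (· < ·) :=
    (PySem.List.pairwise_lt_pyRange_one 1 (PySem.Int.floordiv area 2 + 1)).filter _
  -- same members
  have hmem : ∀ x, x ∈ pvS area 1 ++ (pvL area 1).reverse ↔
      x ∈ (PySem.List.pyRange 1 (PySem.Int.floordiv area 2 + 1) 1).filter
        (fun h => PySem.Int.mod area h == 0) := by
    intro x
    rw [List.mem_append, List.mem_reverse, pv_memS area h2, pv_memL area h2,
      List.mem_filter]
    simp only [PySem.List.mem_pyRange_one, beq_iff_eq, PySem.Int.mod_eq_zero_iff_dvd]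
    have hx2 : x ≤ PySem.Int.floordiv area 2 ↔ x * 2 ≤ area := hd2 x
    constructor
    · rintro (⟨ha, hb, hc⟩ | ⟨ha, hb, hc⟩)
      · have hsq : x * x ≤ area := (pv_sq_le_iff area x h0 ha).2 hb
        have : x * 2 ≤ area := by
          rcases (by omega : x = 1 ∨ 2 ≤ x) with rfl | h
          · omega
          · nlinarith
        exact ⟨⟨ha, by omega⟩, hc⟩
      · have hm1 : 1 ≤ Int.sqrt area := (pv_sq_le_iff area 1 h0 le_rfl).1 (by omega)
        exact ⟨⟨by omega, by omega⟩, hc⟩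
    · rintro ⟨⟨ha, hb⟩, hc⟩
      have hb' : x * 2 ≤ area := by omega
      by_cases hsq : x * x ≤ area
      · exact Or.inl ⟨ha, (pv_sq_le_iff area x h0 ha).1 hsq, hc⟩
      · refine Or.inr ⟨?_, hb', hc⟩
        by_contra hcm
        push Not at hcm
        exact hsq ((pv_sq_le_iff area x h0 ha).2 hcm)
  -- two strictly increasing lists with the same members are equal
  have nd1 : (pvS area 1 ++ (pvL area 1).reverse).Nodup :=
    pwLeft.imp (fun h => ne_of_lt h)
  have nd2 : ((PySem.List.pyRange 1 (PySem.Int.floordiv area 2 + 1) 1).filter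
      (fun h => PySem.Int.mod area h == 0)).Nodup :=
    pwRight.imp (fun h => ne_of_lt h)
  exact PySem.List.eq_of_perm_of_pairwise_le_of_injective (fun x => x)
    (fun a b h => h) ((List.perm_ext_iff_of_nodup nd1 nd2).2 hmem)
    (pwLeft.imp le_of_lt) (pwRight.imp le_of_lt)

-- ===== VERDICT (by name: the statement is the Claim_ definition above) =====
theorem get_width_height_spec : Claim_equal_get_width_height := by
  intro area _
  unfold Spec_get_width_height get_width_height get_width_height_alt
  by_cases h1 : area = 1
  · simp [h1]
  · rw [if_neg (by simp [h1] : ¬((area == 1) = true)),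
        if_neg (by simp [h1] : ¬((area == 1) = true)),
        PySem.List.foldl_append_if]
    by_cases hle : area ≤ 1
    · -- area ≤ 0 here (area ≠ 1): both sides are the empty list
      have hr : PySem.List.pyRange 1 (PySem.Int.floordiv area 2 + 1) 1 = [] := by
        apply PySem.List.pyRange_one_eq_nil
        have := (PySem.Int.floordiv_lt_iff_lt_mul (a := area) (q := 1) (by omega : (0:Int) < 2)).2 (by omega)
        omega
      have hl : pvLoopB area 1 [] [] = ([], []) := by
        rw [pvLoopB, dif_neg (by omega : ¬((1:Int) * 1 ≤ area))]
      rw [hr, hl]; simp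
    · -- area ≥ 2
      push Not at hle
      rw [pvLoopB_spec area (by omega) (Int.sqrt area + 1 - 1).toNat 1 [] [] rfl (by omega)]
      simp only [List.nil_append]
      rw [pv_heights_eq area (by omega)]
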